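-- pv_equiv track=rewrite | github.com/RyanKelleyCosing/hybrid-document-intelligence-platform | src/document_intelligence/extraction.py | resolve_matching_path
-- ===== SOURCE A (Python) =====
-- from collections.abc import Iterable
--
-- ACCOUNT_NUMBER_MATCH_FIELDS = frozenset({"account_number", "account_reference"})
--
-- PARTY_NAME_MATCH_FIELDS = frozenset(
--     {"account_holder", "debtor_name", "patient_name"}
-- )
--
-- def resolve_matching_path(required_fields: Iterable[str]) -> str:
--     """Choose the account-matching path implied by the extraction contract."""
--
--     normalized_required_fields = {
--         field_name.strip().lower()
--         for field_name in required_fields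
--         if field_name.strip()
--     }
--     if normalized_required_fields & ACCOUNT_NUMBER_MATCH_FIELDS:
--         return "account_number_lookup"
--
--     if normalized_required_fields & PARTY_NAME_MATCH_FIELDS:
--         return "party_name_lookup"
--
--     return "request_candidate_hints"
-- ===== SOURCE B (Python) =====
-- ACCOUNT_NUMBER_MATCH_FIELDS = frozenset({"account_number", "account_reference"})
--
-- PARTY_NAME_MATCH_FIELDS = frozenset(
--     {"account_holder", "debtor_name", "patient_name"}
-- )
--
-- # Rank table: account-number fields outrank party-name fields; everything else
-- # (including whitespace-only fields, which normalize to keys not in the table)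
-- # has rank 0.  The answer is just the path named by the highest rank seen.
-- _FIELD_RANK = {
--     "account_number": 2,
--     "account_reference": 2,
--     "account_holder": 1,
--     "debtor_name": 1,
--     "patient_name": 1,
-- }
--
-- _PATHS = ["request_candidate_hints", "party_name_lookup", "account_number_lookup"]
--
-- def resolve_matching_path(required_fields):
--     """Choose the account-matching path implied by the extraction contract."""
--     rank = 0
--     for field_name in required_fields:
--         rank = max(rank, _FIELD_RANK.get(field_name.strip().lower(), 0))
--     return _PATHS[rank]
-- ===== Notes on version B (the rewrite author's own statement) =====
-- stated objective: alternative
-- what changed: Replaces the set comprehension and two frozenset intersections with a max-reduction over a single priority table: each normalized field is mapped to a numeric rank (2 = account-number field, 1 = party-name field, 0 = anything else, including blank fields), and the result is read out of a path list indexed by the maximum rank.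
import Mathlib
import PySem

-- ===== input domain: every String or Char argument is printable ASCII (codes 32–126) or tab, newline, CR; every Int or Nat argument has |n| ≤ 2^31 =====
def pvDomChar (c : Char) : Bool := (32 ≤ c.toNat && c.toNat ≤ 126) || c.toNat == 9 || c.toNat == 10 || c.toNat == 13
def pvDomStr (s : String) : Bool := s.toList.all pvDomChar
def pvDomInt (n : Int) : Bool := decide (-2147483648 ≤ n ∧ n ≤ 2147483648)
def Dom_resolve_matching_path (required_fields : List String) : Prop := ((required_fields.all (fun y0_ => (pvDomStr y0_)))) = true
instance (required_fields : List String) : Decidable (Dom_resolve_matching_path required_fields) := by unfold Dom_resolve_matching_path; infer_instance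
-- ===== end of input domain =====

-- B replaces the intermediate normalized set and two set intersections with a
-- max-reduction over a single numeric priority table indexed into a path list
-- (alternative decomposition; same return value).

-- ===== PORT A =====
def ACCOUNT_NUMBER_MATCH_FIELDS : PySem.Set String :=
  PySem.Set.ofList ["account_number", "account_reference"]

def PARTY_NAME_MATCH_FIELDS : PySem.Set String :=
  PySem.Set.ofList ["account_holder", "debtor_name", "patient_name"]

def resolve_matching_path (required_fields : List String) : String :=
  -- the set comprehension: fold Set.add over the filtered, normalized fields
  let normalized_required_fields : PySem.Set String :=
    (required_fields.filter (fun field_name => PySem.Str.strip field_name ≠ "")).foldl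
      (fun s field_name => PySem.Set.add s (PySem.Str.lower (PySem.Str.strip field_name)))
      PySem.Set.empty
  if PySem.Set.inter normalized_required_fields ACCOUNT_NUMBER_MATCH_FIELDS ≠ [] then
    "account_number_lookup"
  else if PySem.Set.inter normalized_required_fields PARTY_NAME_MATCH_FIELDS ≠ [] then
    "party_name_lookup"
  else
    "request_candidate_hints"

-- ===== PORT B =====
def FIELD_RANK : PySem.Dict String Int :=
  PySem.Dict.ofList
    [("account_number", 2), ("account_reference", 2),
     ("account_holder", 1), ("debtor_name", 1), ("patient_name", 1)]

def PATHS : List String :=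
  ["request_candidate_hints", "party_name_lookup", "account_number_lookup"]

def resolve_matching_path_alt (required_fields : List String) : String :=
  let rank : Int :=
    required_fields.foldl
      (fun rank field_name =>
        max rank (FIELD_RANK.getD (PySem.Str.lower (PySem.Str.strip field_name)) 0))
      0
  -- _PATHS[rank]: rank is always 0, 1 or 2, so the index is in range
  PySem.List.pyGetD PATHS rank ""

-- ===== PRECONDITION & SPEC =====
def Spec_resolve_matching_path (required_fields : List String) (out : String) : Prop := out = resolve_matching_path_alt required_fields
instance (required_fields : List String) (out : String) : Decidable (Spec_resolve_matching_path required_fields out) := by unfold Spec_resolve_matching_path; infer_instance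

-- ===== CLAIM (what is proved, stated in full; the proofs are below) =====
def Claim_equal_resolve_matching_path : Prop := ∀ (required_fields : List String), Dom_resolve_matching_path required_fields → Spec_resolve_matching_path required_fields (resolve_matching_path required_fields)

-- ===== LEMMAS AND PROOFS =====

-- the per-field "hit" predicates
def accHit (f : String) : Bool :=
  (PySem.Str.strip f != "") && ACCOUNT_NUMBER_MATCH_FIELDS.contains (PySem.Str.lower (PySem.Str.strip f))

def partyHit (f : String) : Bool :=
  (PySem.Str.strip f != "") && PARTY_NAME_MATCH_FIELDS.contains (PySem.Str.lower (PySem.Str.strip f))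

-- the two frozensets, reduced to their element lists
theorem acc_set_eq : ACCOUNT_NUMBER_MATCH_FIELDS = ["account_number", "account_reference"] := by
  decide

theorem party_set_eq : PARTY_NAME_MATCH_FIELDS = ["account_holder", "debtor_name", "patient_name"] := by
  decide

-- B's rank table, spelled out key by key
theorem rank_table (n : String) : FIELD_RANK.getD n 0 =
    (if n = "account_number" ∨ n = "account_reference" then 2
     else if n = "account_holder" ∨ n = "debtor_name" ∨ n = "patient_name" then 1 else 0) := by
  simp only [FIELD_RANK, PySem.Dict.ofList, PySem.Dict.update, List.foldl_cons, List.foldl_nil,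
    PySem.Dict.getD_insert, PySem.Dict.getD_empty]
  split_ifs <;> simp_all

-- B's per-field rank, phrased through the hit predicates
theorem rank_eq (f : String) :
    FIELD_RANK.getD (PySem.Str.lower (PySem.Str.strip f)) 0 =
      (if accHit f then 2 else if partyHit f then 1 else 0) := by
  rw [rank_table]
  by_cases h : PySem.Str.strip f = ""
  · have hl : PySem.Str.lower (PySem.Str.strip f) = "" := by rw [h]; decide
    rw [hl]
    simp [accHit, partyHit, h]
  · have hb : (PySem.Str.strip f != "") = true := by simp [h]
    simp only [accHit, partyHit, hb, Bool.true_and, acc_set_eq, party_set_eq,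
      PySem.Set.contains]
    generalize PySem.Str.lower (PySem.Str.strip f) = n
    split_ifs <;> simp_all

-- B's max-fold computes the running maximum from the two any-flags
theorem foldl_rank (fs : List String) (r : Int) (hr : 0 ≤ r) :
    fs.foldl
      (fun rank f => max rank (FIELD_RANK.getD (PySem.Str.lower (PySem.Str.strip f)) 0)) r =
      (if fs.any accHit then max r 2 else if fs.any partyHit then max r 1 else r) := by
  induction fs generalizing r with
  | nil => simp
  | cons f rest ih =>
    rw [List.foldl_cons, rank_eq, ih _ (by split_ifs <;> omega), List.any_cons, List.any_cons]
    by_cases h1 : accHit f <;> by_cases h2 : partyHit f <;>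
      by_cases hA : rest.any accHit <;> by_cases hP : rest.any partyHit <;>
      simp [h1, h2, hA, hP] <;> omega

-- A's intersection-nonempty test is an `any` over the raw list
theorem inter_ne_nil_iff (fs : List String) (t : PySem.Set String)
    (hit : String → Bool)
    (hhit : ∀ f, hit f = ((PySem.Str.strip f != "") && t.contains (PySem.Str.lower (PySem.Str.strip f)))) :
    (PySem.Set.inter
        ((fs.filter (fun f => PySem.Str.strip f ≠ "")).foldl
          (fun s f => PySem.Set.add s (PySem.Str.lower (PySem.Str.strip f)))
          PySem.Set.empty) t ≠ []) ↔ fs.any hit := by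
  constructor
  · intro hne
    obtain ⟨y, hy⟩ := List.exists_mem_of_ne_nil _ hne
    rw [PySem.Set.mem_inter] at hy
    obtain ⟨hy1, hy2⟩ := hy
    rw [PySem.Set.mem_foldl_add] at hy1
    rcases hy1 with h | ⟨f, hf, rfl⟩
    · simp [PySem.Set.empty] at h
    · rw [List.mem_filter] at hf
      obtain ⟨hf1, hf2⟩ := hf
      rw [List.any_eq_true]
      refine ⟨f, hf1, ?_⟩
      rw [hhit]
      simp only [Bool.and_eq_true, bne_iff_ne, PySem.Set.contains_iff]
      exact ⟨by simpa using hf2, hy2⟩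
  · intro h
    rw [List.any_eq_true] at h
    obtain ⟨f, hf, hhf⟩ := h
    rw [hhit] at hhf
    simp only [Bool.and_eq_true, bne_iff_ne, PySem.Set.contains_iff] at hhf
    apply List.ne_nil_of_mem (a := PySem.Str.lower (PySem.Str.strip f))
    rw [PySem.Set.mem_inter, PySem.Set.mem_foldl_add]
    exact ⟨Or.inr ⟨f, List.mem_filter.mpr ⟨hf, by simpa using hhf.1⟩, rfl⟩, hhf.2⟩

-- ===== VERDICT (by name: the statement is the Claim_ definition above) =====
theorem resolve_matching_path_spec : Claim_equal_resolve_matching_path := by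
  intro fs _
  unfold Spec_resolve_matching_path resolve_matching_path resolve_matching_path_alt
  rw [foldl_rank _ _ le_rfl]
  rw [if_congr (inter_ne_nil_iff fs ACCOUNT_NUMBER_MATCH_FIELDS accHit (fun _ => rfl)) rfl
        (if_congr (inter_ne_nil_iff fs PARTY_NAME_MATCH_FIELDS partyHit (fun _ => rfl)) rfl rfl)]
  by_cases h1 : fs.any accHit <;> by_cases h2 : fs.any partyHit <;> simp [h1, h2] <;> decide
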